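-- pv_equiv track=rewrite | github.com/ashik-billah/Data-Communication-Sessional | Bipolar encoding(AMI,B8ZS,HDB3).py | ami_encoding
-- ===== SOURCE A (Python) =====
-- def ami_encoding(data):
--     """AMI (Alternate Mark Inversion) encoding."""
--     encoded_signal = []
--     last_polarity = -1  # Start with negative polarity for the first '1'
--
--     for bit in data:
--         if bit == '0':
--             encoded_signal.append(0)  # Zero voltage for '0'
--         else:
--             last_polarity = -last_polarity
--             encoded_signal.append(last_polarity)
--
--     return encoded_signal
-- ===== SOURCE B (Python) =====
-- def ami_encoding(data):
--     """AMI encoding via prefix counts: a mark's polarity is the parity of the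
--     running count of marks (odd -> +1, even -> -1)."""
--     counts = []
--     c = 0
--     for bit in data:
--         if bit != '0':
--             c += 1
--         counts.append(c)
--     return [0 if bit == '0' else (1 if c % 2 == 1 else -1)
--             for bit, c in zip(data, counts)]
-- ===== Notes on version B (the rewrite author's own statement) =====
-- stated objective: alternative
-- what changed: Replaces the stateful polarity toggle by a two-pass scheme: first build a prefix-count table of marks, then map each bit with its cumulative count (0 stays 0, mark gets +1 on odd count, -1 on even).
import Mathlib
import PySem

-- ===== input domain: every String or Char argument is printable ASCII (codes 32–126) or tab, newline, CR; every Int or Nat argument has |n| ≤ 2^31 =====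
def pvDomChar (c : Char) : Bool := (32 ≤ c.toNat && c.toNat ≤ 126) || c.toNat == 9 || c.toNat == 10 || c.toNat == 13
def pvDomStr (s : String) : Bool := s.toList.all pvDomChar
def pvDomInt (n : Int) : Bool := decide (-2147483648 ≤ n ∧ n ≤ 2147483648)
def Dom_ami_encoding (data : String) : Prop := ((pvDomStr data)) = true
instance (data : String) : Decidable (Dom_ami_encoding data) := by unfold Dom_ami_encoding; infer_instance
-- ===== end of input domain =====

-- B replaces A's stateful polarity toggle with a two-pass prefix-count-of-marks
-- scheme (polarity = parity of running count); alternative decomposition, same cost.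


-- ===== PORT A =====
-- single loop carrying (encoded_signal, last_polarity)
def ami_encoding (data : String) : List Int :=
  (data.toList.foldl
    (fun (st : List Int × Int) bit =>
      if bit = '0' then (st.1 ++ [0], st.2)
      else (st.1 ++ [-st.2], -st.2))
    ([], -1)).1

-- ===== PORT B =====
-- pass 1: prefix counts of marks
def amiCounts : List Char → Int → List Int
  | [], _ => []
  | b :: rest, c =>
    let c' := if b ≠ '0' then c + 1 else c
    c' :: amiCounts rest c'

-- pass 2: map each (bit, cumulative count)
def ami_encoding_alt (data : String) : List Int :=
  (data.toList.zip (amiCounts data.toList 0)).map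
    (fun p => if p.1 = '0' then 0 else if p.2 % 2 = 1 then 1 else -1)

-- ===== PRECONDITION & SPEC =====
def Spec_ami_encoding (data : String) (out : List Int) : Prop := out = ami_encoding_alt data
instance (data : String) (out : List Int) : Decidable (Spec_ami_encoding data out) := by unfold Spec_ami_encoding; infer_instance

-- ===== CLAIM (what is proved, stated in full; the proofs are below) =====
def Claim_equal_ami_encoding : Prop := ∀ (data : String), Dom_ami_encoding data → Spec_ami_encoding data (ami_encoding data)

-- ===== LEMMAS AND PROOFS =====
-- A's polarity state after c marks equals (if c % 2 = 1 then 1 else -1)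
lemma ami_loop (l : List Char) (acc : List Int) (c : Int) :
    (l.foldl
      (fun (st : List Int × Int) bit =>
        if bit = '0' then (st.1 ++ [0], st.2)
        else (st.1 ++ [-st.2], -st.2))
      (acc, if c % 2 = 1 then (1 : Int) else -1)).1
    = acc ++ (l.zip (amiCounts l c)).map
        (fun p => if p.1 = '0' then 0 else if p.2 % 2 = 1 then 1 else -1) := by
  induction l generalizing acc c with
  | nil => simp
  | cons b rest ih =>
    by_cases hb : b = '0'
    · simp only [List.foldl_cons, if_pos hb]
      rw [ih]
      simp [amiCounts, hb]
    · have hpol : -(if c % 2 = 1 then (1 : Int) else -1)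
          = (if (c + 1) % 2 = 1 then (1 : Int) else -1) := by
        rcases Int.emod_two_eq_zero_or_one c with h | h <;> simp [h] <;> omega
      simp only [List.foldl_cons, if_neg hb, hpol]
      rw [ih]
      simp [amiCounts, hb]

-- ===== VERDICT (by name: the statement is the Claim_ definition above) =====
theorem ami_encoding_spec : Claim_equal_ami_encoding := by
  intro data _
  unfold Spec_ami_encoding ami_encoding ami_encoding_alt
  simpa using ami_loop data.toList [] 0
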